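-- pv_equiv track=rewrite | github.com/mayajuanc/NetworkOptimization | optimize.py | build_transport_plan_table
-- ===== SOURCE A (Python) =====
-- def build_transport_plan_table(result, plan_key, num_rows, num_cols, row_label, col_label):
--     table = f"<table border='1'><thead><tr><th>{row_label}</th>"
--     for col in range(num_cols):
--         table += f"<th>{col_label} {col+1}</th>"
--     table += "<th>Row Total</th></tr></thead><tbody>"
--
--     grand_total = 0
--     col_totals = [0] * num_cols
--
--     for row in range(num_rows):
--         table += f"<tr><td>{row_label} {row+1}</td>"
--         row_sum = 0
--         for col in range(num_cols):
--             value = result[plan_key][(row, col)]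
--             table += f"<td>{value}</td>"
--             row_sum += value
--             col_totals[col] += value
--         grand_total += row_sum
--         table += f"<td>{row_sum}</td></tr>"
--
--     table += f"<tr><td><strong>Column Total</strong></td>"
--     for col in range(num_cols):
--         table += f"<td>{col_totals[col]}</td>"
--     table += f"<td><strong>{grand_total}</strong></td></tr></tbody></table>"
--
--     return table
-- ===== SOURCE B (Python) =====
-- def build_transport_plan_table(result, plan_key, num_rows, num_cols, row_label, col_label):
--     # Phase 1: totals as independent reductions over the cell grid.
--     rows = [[result[plan_key][(r, c)] for c in range(num_cols)] for r in range(num_rows)]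
--     row_sums = [sum(row) for row in rows]
--     col_totals = [sum(row[c] for row in rows) for c in range(num_cols)]
--     grand_total = sum(row_sums)
--     # Phase 2: render HTML from the precomputed data with ''.join.
--     header = "".join(f"<th>{col_label} {c+1}</th>" for c in range(num_cols))
--     body = "".join(
--         f"<tr><td>{row_label} {r+1}</td>"
--         + "".join(f"<td>{v}</td>" for v in rows[r])
--         + f"<td>{row_sums[r]}</td></tr>"
--         for r in range(num_rows))
--     footer = "".join(f"<td>{t}</td>" for t in col_totals)
--     return (f"<table border='1'><thead><tr><th>{row_label}</th>" + header
--             + "<th>Row Total</th></tr></thead><tbody>" + body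
--             + "<tr><td><strong>Column Total</strong></td>" + footer
--             + f"<td><strong>{grand_total}</strong></td></tr></tbody></table>")
-- ===== Notes on version B (the rewrite author's own statement) =====
-- stated objective: alternative
-- what changed: A builds the HTML in one fused nested pass that interleaves string concatenation with running row/column/grand totals mutated in place; B first computes the cell grid and all totals as independent reductions (sum per row, sum down each column, sum of row sums) and then renders the header, body rows and footer in a separate pass assembled with ''.join.
import Mathlib
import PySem

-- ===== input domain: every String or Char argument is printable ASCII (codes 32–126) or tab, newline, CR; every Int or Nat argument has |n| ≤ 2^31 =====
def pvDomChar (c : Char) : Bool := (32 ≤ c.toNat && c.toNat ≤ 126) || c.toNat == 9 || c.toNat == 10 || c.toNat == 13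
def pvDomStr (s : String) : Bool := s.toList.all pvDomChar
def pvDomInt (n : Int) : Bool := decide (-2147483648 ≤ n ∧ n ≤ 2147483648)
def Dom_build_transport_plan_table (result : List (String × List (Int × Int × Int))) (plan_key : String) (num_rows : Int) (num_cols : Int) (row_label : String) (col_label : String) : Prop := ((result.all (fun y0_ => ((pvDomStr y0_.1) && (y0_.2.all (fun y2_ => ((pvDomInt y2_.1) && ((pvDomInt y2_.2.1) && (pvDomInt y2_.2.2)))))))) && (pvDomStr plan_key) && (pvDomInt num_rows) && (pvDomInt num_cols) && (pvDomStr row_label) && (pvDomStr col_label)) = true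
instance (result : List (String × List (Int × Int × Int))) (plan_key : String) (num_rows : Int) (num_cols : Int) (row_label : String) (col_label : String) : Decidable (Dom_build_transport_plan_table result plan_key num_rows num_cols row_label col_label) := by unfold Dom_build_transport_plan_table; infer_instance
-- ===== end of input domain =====

-- B replaces A's single fused pass (string += interleaved with running totals) by a
-- two-phase decomposition: totals as independent reductions first, then a separate
-- rendering pass assembled with ''.join; objective: alternative (same cost).

-- result[plan_key][(r, c)] : outer dict lookup (first match on the key string), then
-- inner dict lookup (first match on the (row, col) key pair); none = KeyError.
def pvCell? (result : List (String × List (Int × Int × Int))) (plan_key : String) (r c : Int) : Option Int :=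
  match result.find? (fun kv => kv.1 == plan_key) with
  | none => none
  | some kv => (kv.2.find? (fun t => t.1 == r && t.2.1 == c)).map (fun t => t.2.2)

-- ===== PORT A =====
def build_transport_plan_table (result : List (String × List (Int × Int × Int))) (plan_key : String) (num_rows : Int) (num_cols : Int) (row_label : String) (col_label : String) : String :=
  let table := "<table border='1'><thead><tr><th>" ++ row_label ++ "</th>"
  let table := (PySem.List.pyRange 0 num_cols 1).foldl
    (fun t col => t ++ ("<th>" ++ col_label ++ " " ++ PySem.Int.toStr (col + 1) ++ "</th>")) table
  let table := table ++ "<th>Row Total</th></tr></thead><tbody>"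
  -- state: (table, grand_total, col_totals)
  let st := (PySem.List.pyRange 0 num_rows 1).foldl
    (fun (st : String × Int × List Int) row =>
      -- inner state: (table, row_sum, col_totals)
      let inner := (PySem.List.pyRange 0 num_cols 1).foldl
        (fun (s : String × Int × List Int) col =>
          let value := (pvCell? result plan_key row col).getD 0   -- KeyError excluded by Pre_
          (s.1 ++ ("<td>" ++ PySem.Int.toStr value ++ "</td>"),
           s.2.1 + value,
           PySem.List.pySetD s.2.2 col (PySem.List.pyGetD s.2.2 col 0 + value)))
        (st.1 ++ ("<tr><td>" ++ row_label ++ " " ++ PySem.Int.toStr (row + 1) ++ "</td>"), (0 : Int), st.2.2)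
      (inner.1 ++ ("<td>" ++ PySem.Int.toStr inner.2.1 ++ "</td></tr>"),
       st.2.1 + inner.2.1, inner.2.2))
    (table, (0 : Int), List.replicate num_cols.toNat (0 : Int))
  let table := st.1 ++ "<tr><td><strong>Column Total</strong></td>"
  let table := (PySem.List.pyRange 0 num_cols 1).foldl
    (fun t col => t ++ ("<td>" ++ PySem.Int.toStr (PySem.List.pyGetD st.2.2 col 0) ++ "</td>")) table
  table ++ ("<td><strong>" ++ PySem.Int.toStr st.2.1 ++ "</strong></td></tr></tbody></table>")

-- ===== PORT B =====
def build_transport_plan_table_alt (result : List (String × List (Int × Int × Int))) (plan_key : String) (num_rows : Int) (num_cols : Int) (row_label : String) (col_label : String) : String :=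
  -- Phase 1: the cell grid and its totals, as independent reductions.
  let rows := (PySem.List.pyRange 0 num_rows 1).map (fun r =>
    (PySem.List.pyRange 0 num_cols 1).map (fun c => (pvCell? result plan_key r c).getD 0))
  let row_sums := rows.map (fun row => row.sum)
  let col_totals := (PySem.List.pyRange 0 num_cols 1).map (fun c =>
    (rows.map (fun row => PySem.List.pyGetD row c 0)).sum)
  let grand_total := row_sums.sum
  -- Phase 2: render the HTML from the precomputed data with ''.join.
  let header := PySem.Str.join "" ((PySem.List.pyRange 0 num_cols 1).map (fun c =>
    "<th>" ++ col_label ++ " " ++ PySem.Int.toStr (c + 1) ++ "</th>"))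
  let body := PySem.Str.join "" ((PySem.List.pyRange 0 num_rows 1).map (fun r =>
    ("<tr><td>" ++ row_label ++ " " ++ PySem.Int.toStr (r + 1) ++ "</td>")
    ++ PySem.Str.join "" ((PySem.List.pyGetD rows r []).map (fun v => "<td>" ++ PySem.Int.toStr v ++ "</td>"))
    ++ ("<td>" ++ PySem.Int.toStr (PySem.List.pyGetD row_sums r 0) ++ "</td></tr>")))
  let footer := PySem.Str.join "" (col_totals.map (fun t => "<td>" ++ PySem.Int.toStr t ++ "</td>"))
  ("<table border='1'><thead><tr><th>" ++ row_label ++ "</th>") ++ header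
    ++ "<th>Row Total</th></tr></thead><tbody>" ++ body
    ++ "<tr><td><strong>Column Total</strong></td>" ++ footer
    ++ ("<td><strong>" ++ PySem.Int.toStr grand_total ++ "</strong></td></tr></tbody></table>")

-- ===== PRECONDITION & SPEC =====
-- Pre_ excludes exactly the inputs where A raises KeyError: some needed cell
-- result[plan_key][(r, c)] (0 ≤ r < num_rows, 0 ≤ c < num_cols) is missing.
-- (stated without enumerating the grid: every needed cell is present iff the number of
-- distinct in-grid keys of result[plan_key] is at least num_rows * num_cols)
def Pre_build_transport_plan_table (result : List (String × List (Int × Int × Int))) (plan_key : String) (num_rows : Int) (num_cols : Int) (row_label : String) (col_label : String) : Prop :=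
  num_rows ≤ 0 ∨ num_cols ≤ 0 ∨
    num_rows * num_cols ≤
      (((((result.find? (fun kv => kv.1 == plan_key)).elim [] (fun kv => kv.2)).filter
          (fun t => decide (0 ≤ t.1 ∧ t.1 < num_rows ∧ 0 ≤ t.2.1 ∧ t.2.1 < num_cols))).map
        (fun t => (t.1, t.2.1))).dedup.length : Int)
instance (result : List (String × List (Int × Int × Int))) (plan_key : String) (num_rows : Int) (num_cols : Int) (row_label : String) (col_label : String) : Decidable (Pre_build_transport_plan_table result plan_key num_rows num_cols row_label col_label) := by unfold Pre_build_transport_plan_table; infer_instance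

def pvWitness_build_transport_plan_table : (List (String × List (Int × Int × Int))) × String × Int × Int × String × String :=
  ([("p", [(0, 0, 5), (0, 1, 2), (1, 0, 3), (1, 1, 4)])], "p", 2, 2, "Src", "Dst")

def Spec_build_transport_plan_table (result : List (String × List (Int × Int × Int))) (plan_key : String) (num_rows : Int) (num_cols : Int) (row_label : String) (col_label : String) (out : String) : Prop := out = build_transport_plan_table_alt result plan_key num_rows num_cols row_label col_label
instance (result : List (String × List (Int × Int × Int))) (plan_key : String) (num_rows : Int) (num_cols : Int) (row_label : String) (col_label : String) (out : String) : Decidable (Spec_build_transport_plan_table result plan_key num_rows num_cols row_label col_label out) := by unfold Spec_build_transport_plan_table; infer_instance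

-- ===== CLAIM (what is proved, stated in full; the proofs are below) =====
def Claim_equal_build_transport_plan_table : Prop := ∀ (result : List (String × List (Int × Int × Int))) (plan_key : String) (num_rows : Int) (num_cols : Int) (row_label : String) (col_label : String), Dom_build_transport_plan_table result plan_key num_rows num_cols row_label col_label → Pre_build_transport_plan_table result plan_key num_rows num_cols row_label col_label → Spec_build_transport_plan_table result plan_key num_rows num_cols row_label col_label (build_transport_plan_table result plan_key num_rows num_cols row_label col_label)

-- ===== LEMMAS AND PROOFS =====

-- range(n) as a list of Ints
def pvRint (n : Nat) : List Int := (List.range n).map (fun k : Nat => (k : Int))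

theorem pv_interc_nil (xs : List (List Char)) : [].intercalate xs = xs.flatten := by
  induction xs with
  | nil => rfl
  | cons y ys ih =>
    cases ys with
    | nil => simp [List.intercalate]
    | cons z zs =>
      simp only [List.intercalate, List.intersperse, List.flatten] at *
      simpa using ih

theorem pv_sjoin_toList (xs : List String) :
    (PySem.Str.join "" xs).toList = (xs.map String.toList).flatten := by
  simp [PySem.Str.toList_join, PySem.Chars.join, pv_interc_nil]

theorem pv_sjoin_nil : PySem.Str.join "" [] = "" := by decide

theorem pv_sjoin_cons (x : String) (xs : List String) :
    PySem.Str.join "" (x :: xs) = x ++ PySem.Str.join "" xs := by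
  rw [← String.toList_inj]
  simp only [String.toList_append, pv_sjoin_toList, List.map_cons, List.flatten_cons]

theorem pvRint_succ (n : Nat) : pvRint (n + 1) = pvRint n ++ [(n : Int)] := by
  simp [pvRint, List.range_succ]

theorem pv_strfold {α : Type} (F : α → String) :
    ∀ (xs : List α) (init : String),
      xs.foldl (fun t x => t ++ F x) init = init ++ PySem.Str.join "" (xs.map F) := by
  intro xs
  induction xs with
  | nil => intro init; simp [pv_sjoin_nil]
  | cons x xs ih =>
    intro init
    simp only [List.foldl_cons, List.map_cons]
    rw [ih, pv_sjoin_cons, String.append_assoc]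

theorem pv_foldl_prod3 {β σ₁ σ₂ σ₃ : Type} (f : σ₁ → β → σ₁) (g : σ₂ → β → σ₂) (h : σ₃ → β → σ₃)
    (l : List β) (a : σ₁) (b : σ₂) (c : σ₃) :
    l.foldl (fun s e => (f s.1 e, g s.2.1 e, h s.2.2 e)) (a, b, c)
      = (l.foldl f a, l.foldl g b, l.foldl h c) := by
  have h2 := PySem.List.foldl_prod_mk f (fun (p : σ₂ × σ₃) e => (g p.1 e, h p.2 e)) l a (b, c)
  rw [PySem.List.foldl_prod_mk] at h2
  exact h2

theorem pv_ct_inner (g : Int → Int) (n N : Nat) (hn : n ≤ N) (ct : List Int) (hct : ct.length = N) :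
    (pvRint n).foldl (fun ct c => PySem.List.pySetD ct c (PySem.List.pyGetD ct c 0 + g c)) ct
      = (List.range N).map (fun c => ct.getD c 0 + if c < n then g c else 0) := by
  induction n with
  | zero =>
    simp only [pvRint, List.range_zero, List.map_nil, List.foldl_nil]
    apply List.ext_getElem
    · simp [hct]
    · intro i h1 h2
      simp only [List.length_map, List.length_range] at h2
      simp only [List.getElem_map, List.getElem_range]
      rw [List.getD_eq_getElem ct 0 (by omega)]
      simp
  | succ n ih =>
    have hn' : n ≤ N := by omega
    rw [pvRint_succ, List.foldl_append, ih hn']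
    simp only [List.map_cons, List.map_nil, List.foldl_cons, List.foldl_nil,
      PySem.List.pySetD_natCast, PySem.List.pyGetD_natCast]
    rw [PySem.List.getD_map_range _ _ _ _ (by omega)]
    apply List.ext_getElem
    · simp
    · intro i h1 h2
      simp only [List.length_set, List.length_map, List.length_range] at h1
      rw [List.getElem_set]
      by_cases hin : n = i
      · subst hin
        simp
      · rw [if_neg hin]
        simp only [List.getElem_map, List.getElem_range]
        by_cases hlt : i < n
        · rw [if_pos hlt, if_pos (by omega)]
        · rw [if_neg hlt, if_neg (by omega)]

theorem pv_sjoin_concat (xs : List String) (x : String) :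
    PySem.Str.join "" (xs ++ [x]) = PySem.Str.join "" xs ++ x := by
  induction xs with
  | nil => simp [pv_sjoin_cons, pv_sjoin_nil]
  | cons y ys ih => rw [List.cons_append, pv_sjoin_cons, ih, pv_sjoin_cons, String.append_assoc]

theorem pv_getD_replicate (n : Nat) (c : Nat) : (List.replicate n (0 : Int)).getD c 0 = 0 := by
  rcases Nat.lt_or_ge c n with h | h
  · rw [List.getD_eq_getElem _ _ (by simpa using h)]; simp
  · rw [List.getD_eq_default _ _ (by simpa using h)]

theorem pv_pyRange_rint (x : Int) : PySem.List.pyRange 0 x 1 = pvRint x.toNat := by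
  rw [PySem.List.pyRange_one]
  simp only [pvRint, Int.sub_zero, zero_add]

-- the cell row r of the grid, and the rendered body row r (proof-side abbreviations)
def pvCellsN (res : List (String × List (Int × Int × Int))) (pk : String) (N r : Nat) : List Int :=
  (List.range N).map (fun c : Nat => (pvCell? res pk (r : Int) (c : Int)).getD 0)

def pvRowStr (res : List (String × List (Int × Int × Int))) (pk : String) (rl : String) (N r : Nat) : String :=
  ("<tr><td>" ++ rl ++ " " ++ PySem.Int.toStr ((r : Int) + 1) ++ "</td>")
  ++ PySem.Str.join "" ((pvCellsN res pk N r).map (fun v => "<td>" ++ PySem.Int.toStr v ++ "</td>"))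
  ++ ("<td>" ++ PySem.Int.toStr (pvCellsN res pk N r).sum ++ "</td></tr>")

-- A's inner (column) loop, characterised componentwise
theorem pv_inner (res : List (String × List (Int × Int × Int))) (pk : String) (row : Int)
    (n N : Nat) (hn : n ≤ N) (t0 : String) (s0 : Int) (ct : List Int) (hct : ct.length = N) :
    (pvRint n).foldl (fun (s : String × Int × List Int) col =>
        (s.1 ++ ("<td>" ++ PySem.Int.toStr ((pvCell? res pk row col).getD 0) ++ "</td>"),
         s.2.1 + (pvCell? res pk row col).getD 0,
         PySem.List.pySetD s.2.2 col (PySem.List.pyGetD s.2.2 col 0 + (pvCell? res pk row col).getD 0)))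
      (t0, s0, ct)
    = (t0 ++ PySem.Str.join "" ((List.range n).map (fun c : Nat =>
          "<td>" ++ PySem.Int.toStr ((pvCell? res pk row (c : Int)).getD 0) ++ "</td>")),
       s0 + ((List.range n).map (fun c : Nat => (pvCell? res pk row (c : Int)).getD 0)).sum,
       (List.range N).map (fun c : Nat =>
          ct.getD c 0 + if c < n then (pvCell? res pk row (c : Int)).getD 0 else 0)) := by
  refine (pv_foldl_prod3
      (fun t col => t ++ ("<td>" ++ PySem.Int.toStr ((pvCell? res pk row col).getD 0) ++ "</td>"))
      (fun s col => s + (pvCell? res pk row col).getD 0)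
      (fun ct col => PySem.List.pySetD ct col (PySem.List.pyGetD ct col 0 + (pvCell? res pk row col).getD 0))
      (pvRint n) t0 s0 ct).trans ?_
  refine Prod.ext ?_ (Prod.ext ?_ ?_)
  · rw [pv_strfold]
    simp only [pvRint, List.map_map, Function.comp_def]
  · rw [PySem.List.foldl_add]
    simp only [pvRint, List.map_map, Function.comp_def]
  · exact pv_ct_inner _ n N hn ct hct

-- A's row loop, characterised componentwise
theorem pv_rowloop (res : List (String × List (Int × Int × Int))) (pk : String) (rl : String) (N : Nat) :
    ∀ (m : Nat) (t0 : String) (g0 : Int) (ct0 : List Int), ct0.length = N →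
    (pvRint m).foldl (fun (st : String × Int × List Int) row =>
        (((pvRint N).foldl (fun (s : String × Int × List Int) col =>
            (s.1 ++ ("<td>" ++ PySem.Int.toStr ((pvCell? res pk row col).getD 0) ++ "</td>"),
             s.2.1 + (pvCell? res pk row col).getD 0,
             PySem.List.pySetD s.2.2 col (PySem.List.pyGetD s.2.2 col 0 + (pvCell? res pk row col).getD 0)))
          (st.1 ++ ("<tr><td>" ++ rl ++ " " ++ PySem.Int.toStr (row + 1) ++ "</td>"), (0 : Int), st.2.2)).1
            ++ ("<td>" ++ PySem.Int.toStr ((pvRint N).foldl (fun (s : String × Int × List Int) col =>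
            (s.1 ++ ("<td>" ++ PySem.Int.toStr ((pvCell? res pk row col).getD 0) ++ "</td>"),
             s.2.1 + (pvCell? res pk row col).getD 0,
             PySem.List.pySetD s.2.2 col (PySem.List.pyGetD s.2.2 col 0 + (pvCell? res pk row col).getD 0)))
          (st.1 ++ ("<tr><td>" ++ rl ++ " " ++ PySem.Int.toStr (row + 1) ++ "</td>"), (0 : Int), st.2.2)).2.1 ++ "</td></tr>"),
         st.2.1 + ((pvRint N).foldl (fun (s : String × Int × List Int) col =>
            (s.1 ++ ("<td>" ++ PySem.Int.toStr ((pvCell? res pk row col).getD 0) ++ "</td>"),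
             s.2.1 + (pvCell? res pk row col).getD 0,
             PySem.List.pySetD s.2.2 col (PySem.List.pyGetD s.2.2 col 0 + (pvCell? res pk row col).getD 0)))
          (st.1 ++ ("<tr><td>" ++ rl ++ " " ++ PySem.Int.toStr (row + 1) ++ "</td>"), (0 : Int), st.2.2)).2.1,
         ((pvRint N).foldl (fun (s : String × Int × List Int) col =>
            (s.1 ++ ("<td>" ++ PySem.Int.toStr ((pvCell? res pk row col).getD 0) ++ "</td>"),
             s.2.1 + (pvCell? res pk row col).getD 0,
             PySem.List.pySetD s.2.2 col (PySem.List.pyGetD s.2.2 col 0 + (pvCell? res pk row col).getD 0)))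
          (st.1 ++ ("<tr><td>" ++ rl ++ " " ++ PySem.Int.toStr (row + 1) ++ "</td>"), (0 : Int), st.2.2)).2.2))
      (t0, g0, ct0)
    = (t0 ++ PySem.Str.join "" ((List.range m).map (pvRowStr res pk rl N)),
       g0 + ((List.range m).map (fun r : Nat => (pvCellsN res pk N r).sum)).sum,
       (List.range N).map (fun c : Nat =>
          ct0.getD c 0 + ((List.range m).map (fun r : Nat => (pvCell? res pk (r : Int) (c : Int)).getD 0)).sum)) := by
  intro m
  induction m with
  | zero =>
    intro t0 g0 ct0 hct
    simp only [pvRint, List.range_zero, List.map_nil, List.foldl_nil]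
    refine Prod.ext ?_ (Prod.ext ?_ ?_)
    · simp [pv_sjoin_nil]
    · simp
    · apply List.ext_getElem
      · simp [hct]
      · intro i h1 h2
        simp only [List.length_map, List.length_range] at h2
        simp only [List.getElem_map, List.getElem_range, List.map_nil, List.sum_nil]
        rw [List.getD_eq_getElem ct0 0 (by omega)]
        simp
  | succ m ih =>
    intro t0 g0 ct0 hct
    rw [pvRint_succ, List.foldl_append, ih t0 g0 ct0 hct]
    simp only [List.foldl_cons, List.foldl_nil]
    rw [pv_inner res pk (m : Int) N N (le_refl N) _ _ _ (by simp)]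
    refine Prod.ext ?_ (Prod.ext ?_ ?_)
    · simp only [List.range_succ, List.map_append, List.map_cons, List.map_nil,
        pv_sjoin_concat, pvRowStr, pvCellsN, List.map_map, Function.comp_def, zero_add,
        String.append_assoc]
    · simp [List.range_succ, pvCellsN, List.map_map, Function.comp_def, add_assoc]
    · apply List.ext_getElem
      · simp
      · intro i h1 h2
        simp only [List.length_map, List.length_range] at h1
        simp only [List.getElem_map, List.getElem_range]
        rw [PySem.List.getD_map_range _ _ _ _ (by omega)]
        simp [List.range_succ, h1, add_assoc]

-- ===== VERDICT (by name: the statement is the Claim_ definition above) =====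
theorem build_transport_plan_table_spec : Claim_equal_build_transport_plan_table := by
  unfold Claim_equal_build_transport_plan_table
  intro result plan_key num_rows num_cols row_label col_label _hdom _hpre
  unfold Spec_build_transport_plan_table
  unfold build_transport_plan_table build_transport_plan_table_alt
  simp only [pv_pyRange_rint]
  rw [pv_rowloop result plan_key row_label num_cols.toNat num_rows.toNat _ _ _ (by simp)]
  rw [pv_strfold, pv_strfold]
  simp only [pv_getD_replicate, zero_add, pvRint, List.map_map, Function.comp_def,
    PySem.List.pyGetD_natCast]
  have hAfoot : List.map (fun x : Nat => "<td>" ++ PySem.Int.toStr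
        ((List.map (fun c : Nat => (List.map (fun r : Nat => (pvCell? result plan_key (r : Int) (c : Int)).getD 0)
            (List.range num_rows.toNat)).sum) (List.range num_cols.toNat)).getD x 0) ++ "</td>")
        (List.range num_cols.toNat)
      = List.map (fun x : Nat => "<td>" ++ PySem.Int.toStr
        ((List.map (fun r : Nat => (pvCell? result plan_key (r : Int) (x : Int)).getD 0)
            (List.range num_rows.toNat)).sum) ++ "</td>") (List.range num_cols.toNat) := by
    apply List.map_congr_left
    intro x hx
    rw [PySem.List.getD_map_range _ _ _ _ (List.mem_range.mp hx)]
  rw [hAfoot]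
  have hBfoot : List.map (fun x : Nat => "<td>" ++ PySem.Int.toStr
        ((List.map (fun x_1 : Nat => (List.map (fun c : Nat => (pvCell? result plan_key (x_1 : Int) (c : Int)).getD 0)
            (List.range num_cols.toNat)).getD x 0) (List.range num_rows.toNat)).sum) ++ "</td>")
        (List.range num_cols.toNat)
      = List.map (fun x : Nat => "<td>" ++ PySem.Int.toStr
        ((List.map (fun r : Nat => (pvCell? result plan_key (r : Int) (x : Int)).getD 0)
            (List.range num_rows.toNat)).sum) ++ "</td>") (List.range num_cols.toNat) := by
    apply List.map_congr_left
    intro x hx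
    have hx' := List.mem_range.mp hx
    have : (fun x_1 : Nat => (List.map (fun c : Nat => (pvCell? result plan_key (x_1 : Int) (c : Int)).getD 0)
            (List.range num_cols.toNat)).getD x 0)
        = fun x_1 : Nat => (pvCell? result plan_key (x_1 : Int) (x : Int)).getD 0 :=
      funext fun x_1 => PySem.List.getD_map_range _ _ _ _ hx'
    rw [this]
  rw [hBfoot]
  have hBbody : List.map (fun x : Nat =>
        "<tr><td>" ++ row_label ++ " " ++ PySem.Int.toStr ((x : Int) + 1) ++ "</td>" ++
          PySem.Str.join "" (List.map (fun v => "<td>" ++ PySem.Int.toStr v ++ "</td>")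
            ((List.map (fun x : Nat => List.map (fun x_1 : Nat => (pvCell? result plan_key (x : Int) (x_1 : Int)).getD 0)
                (List.range num_cols.toNat)) (List.range num_rows.toNat)).getD x [])) ++
          ("<td>" ++ PySem.Int.toStr
            ((List.map (fun x : Nat => (List.map (fun x_1 : Nat => (pvCell? result plan_key (x : Int) (x_1 : Int)).getD 0)
                (List.range num_cols.toNat)).sum) (List.range num_rows.toNat)).getD x 0) ++ "</td></tr>"))
        (List.range num_rows.toNat)
      = List.map (pvRowStr result plan_key row_label num_cols.toNat) (List.range num_rows.toNat) := by
    apply List.map_congr_left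
    intro x hx
    have hx' := List.mem_range.mp hx
    rw [PySem.List.getD_map_range _ _ _ _ hx', PySem.List.getD_map_range _ _ _ _ hx']
    simp only [pvRowStr, pvCellsN, String.append_assoc]
  rw [hBbody]
  simp only [pvCellsN, String.append_assoc]
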